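-- pv_equiv track=rewrite | github.com/GianniUSS/TimSmart | tigota_tablet_app.py | translate_date
-- ===== SOURCE A (Python) =====
-- def translate_date(date_str):
--     """Traduce data in italiano"""
--     translations = {
--         'Monday': 'Lunedì', 'Tuesday': 'Martedì', 'Wednesday': 'Mercoledì',
--         'Thursday': 'Giovedì', 'Friday': 'Venerdì', 'Saturday': 'Sabato', 'Sunday': 'Domenica',
--         'January': 'Gennaio', 'February': 'Febbraio', 'March': 'Marzo', 'April': 'Aprile',
--         'May': 'Maggio', 'June': 'Giugno', 'July': 'Luglio', 'August': 'Agosto',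
--         'September': 'Settembre', 'October': 'Ottobre', 'November': 'Novembre', 'December': 'Dicembre'
--     }
--
--     for eng, ita in translations.items():
--         date_str = date_str.replace(eng, ita)
--     return date_str
-- ===== SOURCE B (Python) =====
-- def translate_date(date_str):
--     """Traduce data in italiano: one left-to-right scan, emitting the translation
--     of the first key that matches at the current position."""
--     table = [
--         ("Monday", "Lunedì"), ("Tuesday", "Martedì"), ("Wednesday", "Mercoledì"),
--         ("Thursday", "Giovedì"), ("Friday", "Venerdì"), ("Saturday", "Sabato"),
--         ("Sunday", "Domenica"), ("January", "Gennaio"), ("February", "Febbraio"),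
--         ("March", "Marzo"), ("April", "Aprile"), ("May", "Maggio"),
--         ("June", "Giugno"), ("July", "Luglio"), ("August", "Agosto"),
--         ("September", "Settembre"), ("October", "Ottobre"),
--         ("November", "Novembre"), ("December", "Dicembre"),
--     ]
--     out = []
--     i = 0
--     n = len(date_str)
--     while i < n:
--         for eng, ita in table:
--             if date_str.startswith(eng, i):
--                 out.append(ita)
--                 i += len(eng)
--                 break
--         else:
--             out.append(date_str[i])
--             i += 1
--     return ''.join(out)
-- ===== Notes on version B (the rewrite author's own statement) =====
-- stated objective: alternative
-- what changed: One left-to-right scan of the string that emits the translation at the first matching key (building the output once), instead of 19 sequential whole-string str.replace passes.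
import Mathlib
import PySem

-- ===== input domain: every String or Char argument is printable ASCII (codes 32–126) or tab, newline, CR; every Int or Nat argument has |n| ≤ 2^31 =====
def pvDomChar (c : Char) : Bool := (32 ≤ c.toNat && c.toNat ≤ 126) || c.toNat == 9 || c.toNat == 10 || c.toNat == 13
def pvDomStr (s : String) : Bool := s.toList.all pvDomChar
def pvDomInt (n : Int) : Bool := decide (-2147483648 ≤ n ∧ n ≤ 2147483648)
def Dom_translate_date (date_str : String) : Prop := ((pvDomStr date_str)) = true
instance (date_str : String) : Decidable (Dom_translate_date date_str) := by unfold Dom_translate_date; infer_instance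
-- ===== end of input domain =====

-- B replaces A's 19 sequential whole-string str.replace passes by ONE left-to-right scan
-- that emits the translation of the first key matching at the current position (objective: alternative).

-- ===== PORT A =====
-- the dict literal of A, as an association list in insertion order
def translationsA : List (String × String) :=
  [("Monday", "Lunedì"), ("Tuesday", "Martedì"), ("Wednesday", "Mercoledì"),
   ("Thursday", "Giovedì"), ("Friday", "Venerdì"), ("Saturday", "Sabato"), ("Sunday", "Domenica"),
   ("January", "Gennaio"), ("February", "Febbraio"), ("March", "Marzo"), ("April", "Aprile"),
   ("May", "Maggio"), ("June", "Giugno"), ("July", "Luglio"), ("August", "Agosto"),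
   ("September", "Settembre"), ("October", "Ottobre"), ("November", "Novembre"), ("December", "Dicembre")]

-- for eng, ita in translations.items(): date_str = date_str.replace(eng, ita)
def translate_date (date_str : String) : String :=
  translationsA.foldl (fun s kv => PySem.Str.replace s kv.1 kv.2) date_str

-- ===== PORT B =====
-- B's dict literal, on code points (B scans character by character)
def translationsB : List (List Char × List Char) :=
  [("Monday".toList, "Lunedì".toList), ("Tuesday".toList, "Martedì".toList),
   ("Wednesday".toList, "Mercoledì".toList), ("Thursday".toList, "Giovedì".toList),
   ("Friday".toList, "Venerdì".toList), ("Saturday".toList, "Sabato".toList),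
   ("Sunday".toList, "Domenica".toList), ("January".toList, "Gennaio".toList),
   ("February".toList, "Febbraio".toList), ("March".toList, "Marzo".toList),
   ("April".toList, "Aprile".toList), ("May".toList, "Maggio".toList),
   ("June".toList, "Giugno".toList), ("July".toList, "Luglio".toList),
   ("August".toList, "Agosto".toList), ("September".toList, "Settembre".toList),
   ("October".toList, "Ottobre".toList), ("November".toList, "Novembre".toList),
   ("December".toList, "Dicembre".toList)]

-- B's while-loop: at each position the first key of the table matching there is
-- emitted as its translation and skipped, otherwise the character is copied
-- ('rest.drop (k.length - 1)' after consuming the head char is Python's 'i += len(eng)';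
-- all keys are nonempty)
def scanLoop (tbl : List (List Char × List Char)) : List Char → List Char
  | [] => []
  | c :: rest =>
    match tbl.find? (fun kv => kv.1.isPrefixOf (c :: rest)) with
    | some (k, v) => v ++ scanLoop tbl (rest.drop (k.length - 1))
    | none => c :: scanLoop tbl rest
termination_by l => l.length
decreasing_by
  · simp only [List.length_drop, List.length_cons]; omega
  · simp

def translate_date_alt (date_str : String) : String :=
  String.ofList (scanLoop translationsB date_str.toList)

-- ===== PRECONDITION & SPEC =====
def Spec_translate_date (date_str : String) (out : String) : Prop := out = translate_date_alt date_str
instance (date_str : String) (out : String) : Decidable (Spec_translate_date date_str out) := by unfold Spec_translate_date; infer_instance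

-- ===== CLAIM (what is proved, stated in full; the proofs are below) =====
def Claim_equal_translate_date : Prop := ∀ (date_str : String), Dom_translate_date date_str → Spec_translate_date date_str (translate_date date_str)

-- ===== LEMMAS AND PROOFS =====

-- A structurally recursive reformulation of PySem.Chars.replace (proved equal below)
def myRep (old new : List Char) : List Char → List Char
  | [] => []
  | c :: t =>
    if old.isPrefixOf (c :: t) then new ++ myRep old new (t.drop (old.length - 1))
    else c :: myRep old new t
termination_by l => l.length
decreasing_by
  · simp only [List.length_drop, List.length_cons]; omega
  · simp

lemma myRep_nil (old new : List Char) : myRep old new [] = [] := by rw [myRep]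

lemma myRep_cons_pos {old : List Char} (new : List Char) {c : Char} {t : List Char}
    (h : old <+: (c :: t)) :
    myRep old new (c :: t) = new ++ myRep old new (t.drop (old.length - 1)) := by
  rw [myRep, if_pos (List.isPrefixOf_iff_prefix.mpr h)]

lemma myRep_cons_neg {old : List Char} (new : List Char) {c : Char} {t : List Char}
    (h : ¬ old <+: (c :: t)) :
    myRep old new (c :: t) = c :: myRep old new t := by
  rw [myRep, if_neg (fun hb => h (List.isPrefixOf_iff_prefix.mp hb))]

lemma go_spec (old new : List Char) (hold : old ≠ []) :
    ∀ (fuel : Nat) (l acc : List Char), l.length ≤ fuel →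
      PySem.Chars.replace.go old new fuel l acc = acc.reverse ++ myRep old new l := by
  intro fuel
  induction fuel with
  | zero =>
    intro l acc hl
    have : l = [] := List.length_eq_zero_iff.mp (Nat.le_zero.mp hl)
    subst this
    rw [PySem.Chars.replace.go.eq_def]
    simp [myRep_nil]
  | succ n ih =>
    intro l acc hl
    cases l with
    | nil => rw [PySem.Chars.replace.go.eq_def]; simp [myRep_nil]
    | cons c t =>
      rw [PySem.Chars.replace.go.eq_def]
      simp only []
      by_cases hp : old.isPrefixOf (c :: t)
      · rw [if_pos hp]
        have hdrop : (List.drop old.length (c :: t)).length ≤ n := by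
          have : 1 ≤ old.length := by
            cases old with
            | nil => exact absurd rfl hold
            | cons _ _ => simp
          simp only [List.length_drop, List.length_cons] at *
          omega
        rw [ih _ _ hdrop]
        rw [myRep_cons_pos new (List.isPrefixOf_iff_prefix.mp hp)]
        have : List.drop old.length (c :: t) = t.drop (old.length - 1) := by
          cases old with
          | nil => exact absurd rfl hold
          | cons o os => simp
        rw [this]
        simp
      · rw [if_neg hp]
        have : t.length ≤ n := by simpa using hl
        rw [ih _ _ this]
        rw [myRep_cons_neg new (fun hb => hp (List.isPrefixOf_iff_prefix.mpr hb))]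
        simp

lemma replace_eq_myRep {old : List Char} (new s : List Char) (hold : old ≠ []) :
    PySem.Chars.replace s old new = myRep old new s := by
  unfold PySem.Chars.replace
  rw [if_neg (by simpa using hold)]
  simpa using go_spec old new hold s.length s [] le_rfl

-- fold of myRep over a table (the shape of port A after the bridge to List Char)
def foldRep (P : List (List Char × List Char)) (s : List Char) : List Char :=
  P.foldl (fun acc kv => myRep kv.1 kv.2 acc) s

-- character classes: keys and values start with an ASCII capital, their tails never contain one
def charUp (c : Char) : Bool := 65 ≤ c.toNat && c.toNat ≤ 90
def headUp (l : List Char) : Bool := match l with | [] => false | c :: _ => charUp c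
def tailOK (l : List Char) : Bool := (l.drop 1).all (fun c => !charUp c)

lemma factShape : translationsB.all
    (fun kv => !kv.1.isEmpty && headUp kv.1 && tailOK kv.1 &&
               !kv.2.isEmpty && headUp kv.2 && tailOK kv.2) = true := by decide

-- a key is never prefix-compatible with the value of a DIFFERENT key
lemma factKeyVal : translationsB.all (fun kv => translationsB.all
    (fun kv' => decide (kv.1 = kv'.1) || (!kv.1.isPrefixOf kv'.2 && !kv'.2.isPrefixOf kv.1))) = true := by decide

lemma factKeys : (translationsB.map Prod.fst).Pairwise
    (fun a b => ¬ a <+: b ∧ ¬ b <+: a) := by decide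

lemma mem_props {k v : List Char} (h : (k, v) ∈ translationsB) :
    k ≠ [] ∧ headUp k = true ∧ tailOK k = true ∧
    v ≠ [] ∧ headUp v = true ∧ tailOK v = true := by
  have := List.all_eq_true.mp factShape _ h
  simp only [Bool.and_eq_true, Bool.not_eq_true', List.isEmpty_eq_false_iff] at this
  tauto

lemma mem_keyval {k v k' v' : List Char} (h : (k, v) ∈ translationsB)
    (h' : (k', v') ∈ translationsB) (hne : k ≠ k') : ¬ k <+: v' ∧ ¬ v' <+: k := by
  have := List.all_eq_true.mp (List.all_eq_true.mp factKeyVal _ h) _ h'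
  simp only [Bool.or_eq_true, Bool.and_eq_true, Bool.not_eq_true', decide_eq_true_eq] at this
  rcases this with h1 | ⟨h1, h2⟩
  · exact absurd h1 hne
  · exact ⟨fun hp => by simp [List.isPrefixOf_iff_prefix.mpr hp] at h1,
           fun hp => by simp [List.isPrefixOf_iff_prefix.mpr hp] at h2⟩

lemma prefix_head {k l : List Char} (hk : k ≠ []) (h : k <+: l) : l.head? = k.head? := by
  obtain ⟨u, rfl⟩ := h
  cases k with
  | nil => exact absurd rfl hk
  | cons c t => rfl

-- a word starting with a capital never matches at the front of a capital-free word ++ anything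
lemma notPrefix_of_allNot {old a b : List Char} (hup : headUp old = true)
    (ha : ∀ c ∈ a, charUp c = false) (hne : a ≠ []) : ¬ old <+: (a ++ b) := by
  intro h
  have hold : old ≠ [] := by intro he; subst he; simp [headUp] at hup
  have hhead := prefix_head hold h
  cases old with
  | nil => exact absurd rfl hold
  | cons o os =>
    cases a with
    | nil => exact absurd rfl hne
    | cons x xs =>
      simp only [List.cons_append, List.head?] at hhead
      have hx : x = o := by simpa using hhead
      have := ha x (by simp)
      rw [hx] at this
      simp only [headUp] at hup
      rw [this] at hup
      exact absurd hup (by simp)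

lemma RAL_allNot {old new : List Char} (hup : headUp old = true) :
    ∀ (a b : List Char), (∀ c ∈ a, charUp c = false) → myRep old new (a ++ b) = a ++ myRep old new b := by
  intro a
  induction a with
  | nil => intro b _; rfl
  | cons c a' ih =>
    intro b ha
    have h0 : ¬ old <+: (c :: (a' ++ b)) :=
      notPrefix_of_allNot hup (a := c :: a') (b := b) ha (by simp)
    rw [List.cons_append, myRep_cons_neg new h0, ih b (fun x hx => ha x (by simp [hx]))]
    simp

lemma RAL_classes {old new : List Char} (hup : headUp old = true) :
    ∀ (a b : List Char), tailOK a = true → ¬ old <+: (a ++ b) →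
      myRep old new (a ++ b) = a ++ myRep old new b := by
  intro a b ha h0
  cases a with
  | nil => rfl
  | cons c a' =>
    have ha' : ∀ x ∈ a', charUp x = false := by
      intro x hx
      have := List.all_eq_true.mp ha x (by simpa using hx)
      simpa using this
    rw [List.cons_append, myRep_cons_neg new (by simpa using h0),
        RAL_allNot hup a' b ha']
    simp

-- reachability: x is obtained from t by replacing keys of Q with their values
inductive Tr (Q : List (List Char × List Char)) : List Char → List Char → Prop
  | nil : Tr Q [] []
  | keep (c : Char) {t x : List Char} : Tr Q t x → Tr Q (c :: t) (c :: x)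
  | block {k v : List Char} {t x : List Char} :
      (k, v) ∈ Q → Tr Q t x → Tr Q (k ++ t) (v ++ x)

lemma Tr_refl (Q : List (List Char × List Char)) : ∀ t, Tr Q t t := by
  intro t; induction t with
  | nil => exact Tr.nil
  | cons c t ih => exact Tr.keep c ih

lemma Tr_mono {Q Q' : List (List Char × List Char)} (hsub : ∀ kv ∈ Q, kv ∈ Q') :
    ∀ {t x : List Char}, Tr Q t x → Tr Q' t x := by
  intro t x h
  induction h with
  | nil => exact Tr.nil
  | keep c _ ih => exact Tr.keep c ih
  | block hm _ ih => exact Tr.block (hsub _ hm) ih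

-- a capital-free word matching the front of x already matches the front of t
lemma Tr_low_prefix {Q : List (List Char × List Char)} (hQ : ∀ kv ∈ Q, kv ∈ translationsB) :
    ∀ {t x : List Char}, Tr Q t x → ∀ {w : List Char},
    (∀ c ∈ w, charUp c = false) → w <+: x →
    w <+: t ∧ Tr Q (t.drop w.length) (x.drop w.length) := by
  intro t x h
  induction h with
  | nil =>
    intro w _ hw
    have : w = [] := List.prefix_nil.mp hw
    subst this
    exact ⟨List.nil_prefix, by simpa using (Tr.nil : Tr Q [] [])⟩
  | @keep c t' x' htr ih =>
    intro w hlow hw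
    cases w with
    | nil => exact ⟨List.nil_prefix, by simpa using Tr.keep c htr⟩
    | cons a w' =>
      obtain ⟨u, hu⟩ := hw
      simp only [List.cons_append, List.cons.injEq] at hu
      obtain ⟨rfl, hu2⟩ := hu
      obtain ⟨h1, h2⟩ := ih (fun z hz => hlow z (by simp [hz])) ⟨u, hu2⟩
      refine ⟨List.cons_prefix_cons.mpr ⟨rfl, h1⟩, ?_⟩
      simpa using h2
  | @block k v t' x' hm htr ih =>
    intro w hlow hw
    cases w with
    | nil =>
      exact ⟨List.nil_prefix, by simpa using Tr.block hm htr⟩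
    | cons a w' =>
      exfalso
      have hv := (mem_props (hQ _ hm)).2.2.2
      cases hvv : v with
      | nil => rw [hvv] at hv; exact hv.1 rfl
      | cons b v' =>
        rw [hvv] at hw
        obtain ⟨u, hu⟩ := hw
        simp only [List.cons_append, List.cons.injEq] at hu
        have hab : a = b := hu.1
        have hupb : charUp b = true := by
          have := hv.2.1
          rw [hvv] at this
          simpa [headUp] using this
        have := hlow a (by simp)
        rw [hab, hupb] at this
        exact absurd this (by simp)

-- a key not in Q matching the front of x matches the front of t
lemma Tr_key_prefix {Q : List (List Char × List Char)} (hQ : ∀ kv ∈ Q, kv ∈ translationsB) :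
    ∀ {t x : List Char}, Tr Q t x → ∀ {k v : List Char},
    (k, v) ∈ translationsB → (∀ kv ∈ Q, k ≠ kv.1) → k <+: x →
    k <+: t ∧ Tr Q (t.drop k.length) (x.drop k.length) := by
  intro t x h
  induction h with
  | nil =>
    intro k v hk _ hw
    have : k = [] := List.prefix_nil.mp hw
    exact absurd this (mem_props hk).1
  | @keep c t' x' htr ih =>
    intro k v hk hnot hw
    cases hkk : k with
    | nil => exact absurd hkk (mem_props hk).1
    | cons a k' =>
      rw [hkk] at hw
      obtain ⟨u, hu⟩ := hw
      simp only [List.cons_append, List.cons.injEq] at hu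
      obtain ⟨rfl, hu2⟩ := hu
      have hlow : ∀ z ∈ k', charUp z = false := by
        intro z hz
        have := (mem_props hk).2.2.1
        rw [hkk] at this
        simpa using List.all_eq_true.mp this z (by simpa using hz)
      obtain ⟨h1, h2⟩ := Tr_low_prefix hQ htr hlow ⟨u, hu2⟩
      refine ⟨List.cons_prefix_cons.mpr ⟨rfl, h1⟩, ?_⟩
      simpa using h2
  | @block k'' v'' t' x' hm htr ih =>
    intro k v hk hnot hw
    exfalso
    have hne : k ≠ k'' := hnot _ hm
    have hkv := mem_keyval hk (hQ _ hm) hne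
    rcases List.prefix_or_prefix_of_prefix hw (List.prefix_append v'' x') with h1 | h1
    · exact hkv.1 h1
    · exact hkv.2 h1

-- replacing one fresh key preserves reachability
lemma Tr_myRep {k v : List Char} (hkv : (k, v) ∈ translationsB)
    {Q : List (List Char × List Char)} (hQ : ∀ kv ∈ Q, kv ∈ translationsB)
    (hfresh : ∀ kv ∈ Q, k ≠ kv.1) :
    ∀ (n : Nat) (x t : List Char), x.length ≤ n → Tr Q t x →
      Tr ((k, v) :: Q) t (myRep k v x) := by
  intro n
  induction n with
  | zero =>
    intro x t hl htr
    have : x = [] := List.length_eq_zero_iff.mp (Nat.le_zero.mp hl)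
    subst this
    rw [myRep_nil]
    exact Tr_mono (fun z hz => by simp [hz]) htr
  | succ n ih =>
    intro x t hl htr
    by_cases hp : k <+: x
    · obtain ⟨hkt, hdrop⟩ := Tr_key_prefix hQ htr hkv hfresh hp
      obtain ⟨t', rfl⟩ := hkt
      cases hxx : x with
      | nil =>
        exfalso
        rw [hxx] at hp
        exact (mem_props hkv).1 (List.prefix_nil.mp hp)
      | cons c xt =>
        rw [hxx] at hp
        rw [myRep_cons_pos v hp]
        have hk1 : 1 ≤ k.length := by
          cases k with
          | nil => exact absurd rfl (mem_props hkv).1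
          | cons _ _ => simp
        have heq : xt.drop (k.length - 1) = x.drop k.length := by
          rw [hxx]; cases k with
          | nil => exact absurd rfl (mem_props hkv).1
          | cons _ _ => simp
        rw [heq]
        have hlen : (x.drop k.length).length ≤ n := by
          simp only [List.length_drop]
          rw [hxx] at hl ⊢
          simp only [List.length_cons] at hl ⊢
          omega
        have hdrop' : Tr Q t' (x.drop k.length) := by simpa using hdrop
        exact Tr.block (by simp) (ih (x.drop k.length) t' hlen hdrop')
    · cases htr with
      | nil => rw [myRep_nil]; exact Tr.nil
      | @keep c t0 x0 htr0 =>
        rw [myRep_cons_neg v hp]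
        exact Tr.keep c (ih x0 t0 (by simpa using hl) htr0)
      | @block k'' v'' t0 x0 hm htr0 =>
        have hprops := mem_props (hQ _ hm)
        rw [RAL_classes (mem_props hkv).2.1 v'' x0 hprops.2.2.2.2.2 hp]
        have hlen : x0.length ≤ n := by
          have hv'' : v'' ≠ [] := hprops.2.2.2.1
          have : 1 ≤ v''.length := by
            cases v'' with
            | nil => exact absurd rfl hv''
            | cons _ _ => simp
          simp only [List.length_append] at hl
          omega
        exact Tr.block (by simp [hm]) (ih x0 t0 hlen htr0)

lemma foldRep_nil (P : List (List Char × List Char)) : foldRep P [] = [] := by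
  induction P with
  | nil => rfl
  | cons kv P ih => simp only [foldRep, List.foldl_cons, myRep_nil] at ih ⊢; exact ih

-- every replace pass lets an inert prefix a through
lemma foldRep_protect : ∀ (P : List (List Char × List Char)),
    (∀ kv ∈ P, kv ∈ translationsB) → ∀ (a : List Char), tailOK a = true →
    (∀ kv ∈ P, ¬ kv.1 <+: a ∧ ¬ a <+: kv.1) →
    ∀ x, foldRep P (a ++ x) = a ++ foldRep P x := by
  intro P
  induction P with
  | nil => intro _ a _ _ x; rfl
  | cons kv P ih =>
    intro hP a ha hinc x
    have hk := mem_props (hP kv (by simp))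
    have h0 : ¬ kv.1 <+: (a ++ x) := by
      intro h
      rcases List.prefix_or_prefix_of_prefix h (List.prefix_append a x) with h1 | h1
      · exact (hinc kv (by simp)).1 h1
      · exact (hinc kv (by simp)).2 h1
    simp only [foldRep, List.foldl_cons]
    rw [RAL_classes hk.2.1 a x ha h0]
    exact ih (fun z hz => hP z (by simp [hz])) a ha (fun z hz => hinc z (by simp [hz])) _

lemma myRep_front {k : List Char} (v : List Char) (hk : k ≠ []) (y : List Char) :
    myRep k v (k ++ y) = v ++ myRep k v y := by
  cases hkk : k with
  | nil => exact absurd hkk hk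
  | cons c k' =>
    rw [hkk] at *
    rw [List.cons_append, myRep_cons_pos v (by exact ⟨y, by simp⟩)]
    congr 1
    simp

lemma foldRep_split (P1 P2 : List (List Char × List Char)) (kv : List Char × List Char)
    (s : List Char) :
    foldRep (P1 ++ kv :: P2) s = foldRep P2 (myRep kv.1 kv.2 (foldRep P1 s)) := by
  simp [foldRep, List.foldl_append]

-- the matched key commutes with the whole fold
lemma foldRep_key {k v : List Char} (hkv : (k, v) ∈ translationsB) (r : List Char) :
    foldRep translationsB (k ++ r) = v ++ foldRep translationsB r := by
  obtain ⟨P1, P2, hsplit⟩ := List.append_of_mem hkv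
  have hsub1 : ∀ z ∈ P1, z ∈ translationsB := by intro z hz; rw [hsplit]; simp [hz]
  have hsub2 : ∀ z ∈ P2, z ∈ translationsB := by intro z hz; rw [hsplit]; simp [hz]
  have hkeys := factKeys
  rw [hsplit, List.map_append, List.map_cons] at hkeys
  rcases List.pairwise_append.mp hkeys with ⟨-, h2, h3⟩
  have hprops := mem_props hkv
  have hinc1 : ∀ z ∈ P1, ¬ z.1 <+: k ∧ ¬ k <+: z.1 := by
    intro z hz
    exact h3 z.1 (List.mem_map_of_mem hz) k (by simp)
  have hne2 : ∀ z ∈ P2, z.1 ≠ k := by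
    intro z hz heq
    have := (List.pairwise_cons.mp h2).1 z.1 (List.mem_map_of_mem hz)
    rw [heq] at this
    exact this.1 (List.prefix_refl k)
  have hinc2 : ∀ z ∈ P2, ¬ z.1 <+: v ∧ ¬ v <+: z.1 := by
    intro z hz
    obtain ⟨zk, zv⟩ := z
    exact mem_keyval (hsub2 _ hz) hkv (hne2 _ hz)
  rw [hsplit, foldRep_split, foldRep_split]
  rw [foldRep_protect P1 hsub1 k hprops.2.2.1 hinc1 r,
      myRep_front v hprops.1,
      foldRep_protect P2 hsub2 v hprops.2.2.2.2.2 hinc2]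

-- no key matches the front: the head character passes through the whole fold
lemma foldRep_nomatch {c : Char} {t : List Char}
    (hfront : ∀ kv ∈ translationsB, ¬ kv.1 <+: (c :: t)) :
    ∀ (P Q : List (List Char × List Char)),
      (∀ kv ∈ P, kv ∈ translationsB) → (∀ kv ∈ Q, kv ∈ translationsB) →
      (P.map Prod.fst ++ Q.map Prod.fst).Nodup →
      ∀ x, Tr Q t x → foldRep P (c :: x) = c :: foldRep P x := by
  intro P
  induction P with
  | nil => intro Q _ _ _ x _; rfl
  | cons kv P ih =>
    intro Q hP hQ hnd x htr
    obtain ⟨k', v'⟩ := kv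
    have hmem : (k', v') ∈ translationsB := hP _ (by simp)
    have hk' := mem_props hmem
    have h0 : ¬ k' <+: (c :: x) := by
      intro h
      cases hkk : k' with
      | nil => exact hk'.1 hkk
      | cons a k'' =>
        rw [hkk] at h
        obtain ⟨u, hu⟩ := h
        simp only [List.cons_append, List.cons.injEq] at hu
        obtain ⟨rfl, hu2⟩ := hu
        have hlow : ∀ z ∈ k'', charUp z = false := by
          intro z hz
          have := hk'.2.2.1
          rw [hkk] at this
          simpa using List.all_eq_true.mp this z (by simpa using hz)
        obtain ⟨h1, _⟩ := Tr_low_prefix hQ htr hlow ⟨u, hu2⟩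
        exact hfront _ hmem (by rw [hkk]; exact List.cons_prefix_cons.mpr ⟨rfl, h1⟩)
    have hfresh : ∀ z ∈ Q, k' ≠ z.1 := by
      intro z hz heq
      have : k' ∈ Q.map Prod.fst := by
        rw [heq]; exact List.mem_map_of_mem hz
      have hin : k' ∈ ((k', v') :: P).map Prod.fst := by simp
      exact (List.nodup_append.mp hnd).2.2 k' hin k' this rfl
      -- disjointness from Nodup of the concatenated key lists
    simp only [foldRep, List.foldl_cons]
    rw [myRep_cons_neg v' h0]
    have htr' : Tr ((k', v') :: Q) t (myRep k' v' x) :=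
      Tr_myRep hmem hQ hfresh x.length x t le_rfl htr
    have hnd' : (P.map Prod.fst ++ ((k', v') :: Q).map Prod.fst).Nodup := by
      simp only [List.map_cons]
      exact (List.perm_middle.symm).nodup hnd
    exact ih ((k', v') :: Q) (fun z hz => hP z (by simp [hz]))
      (by intro z hz; simp only [List.mem_cons] at hz
          rcases hz with rfl | hz
          · exact hmem
          · exact hQ z hz) hnd' (myRep k' v' x) htr'

lemma keysNodup : (translationsB.map Prod.fst).Nodup := by decide

lemma scanLoop_nil (tbl : List (List Char × List Char)) : scanLoop tbl [] = [] := by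
  rw [scanLoop]

lemma scanLoop_cons_some {tbl : List (List Char × List Char)} {c : Char} {rest k v : List Char}
    (h : tbl.find? (fun kv => kv.1.isPrefixOf (c :: rest)) = some (k, v)) :
    scanLoop tbl (c :: rest) = v ++ scanLoop tbl (rest.drop (k.length - 1)) := by
  rw [scanLoop, h]

lemma scanLoop_cons_none {tbl : List (List Char × List Char)} {c : Char} {rest : List Char}
    (h : tbl.find? (fun kv => kv.1.isPrefixOf (c :: rest)) = none) :
    scanLoop tbl (c :: rest) = c :: scanLoop tbl rest := by
  rw [scanLoop, h]

lemma scan_eq_foldRep : ∀ (n : Nat) (s : List Char), s.length ≤ n →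
    foldRep translationsB s = scanLoop translationsB s := by
  intro n
  induction n with
  | zero =>
    intro s hl
    have : s = [] := List.length_eq_zero_iff.mp (Nat.le_zero.mp hl)
    subst this
    rw [foldRep_nil, scanLoop_nil]
  | succ n ih =>
    intro s hl
    cases s with
    | nil => rw [foldRep_nil, scanLoop_nil]
    | cons c t =>
      cases hf : translationsB.find? (fun kv => kv.1.isPrefixOf (c :: t)) with
      | some kv =>
        obtain ⟨k, v⟩ := kv
        have hmem : (k, v) ∈ translationsB := List.mem_of_find?_eq_some hf
        have hpre : k <+: (c :: t) :=
          List.isPrefixOf_iff_prefix.mp (by simpa using List.find?_some hf)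
        obtain ⟨r, hr⟩ := hpre
        have hk1 : 1 ≤ k.length := by
          cases hkk : k with
          | nil => exact absurd hkk (mem_props hmem).1
          | cons _ _ => simp
        have hlen : r.length ≤ n := by
          have := congrArg List.length hr
          simp only [List.length_append, List.length_cons] at this hl
          omega
        rw [scanLoop_cons_some hf, ← hr, foldRep_key hmem]
        have hdropeq : t.drop (k.length - 1) = r := by
          have h1 := congrArg (List.drop k.length) hr
          rw [List.drop_left] at h1
          cases hkk : k with
          | nil => exact absurd hkk (mem_props hmem).1
          | cons a ks =>
            rw [hkk] at h1
            simpa using h1.symm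
        rw [hdropeq, ih r hlen]
      | none =>
        have hfront : ∀ kv ∈ translationsB, ¬ kv.1 <+: (c :: t) := by
          intro kv hm hp
          have := List.find?_eq_none.mp hf kv hm
          simp [List.isPrefixOf_iff_prefix.mpr hp] at this
        rw [scanLoop_cons_none hf,
            foldRep_nomatch hfront translationsB [] (fun z hz => hz) (by simp)
              (by simpa using keysNodup) t (Tr_refl [] t),
            ih t (by simpa using hl)]

lemma toList_foldA : ∀ (P : List (String × String)) (s : String),
    (P.foldl (fun s kv => PySem.Str.replace s kv.1 kv.2) s).toList =
      (P.map (fun kv => (kv.1.toList, kv.2.toList))).foldl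
        (fun acc kv => PySem.Chars.replace acc kv.1 kv.2) s.toList := by
  intro P
  induction P with
  | nil => intro s; rfl
  | cons kv P ih => intro s; simpa using ih (PySem.Str.replace s kv.1 kv.2)

lemma tablesEq : translationsA.map (fun kv => (kv.1.toList, kv.2.toList)) = translationsB := by
  decide

lemma foldChars_eq_foldRep : ∀ (P : List (List Char × List Char)),
    (∀ z ∈ P, z ∈ translationsB) → ∀ (l : List Char),
    P.foldl (fun acc kv => PySem.Chars.replace acc kv.1 kv.2) l = foldRep P l := by
  intro P
  induction P with
  | nil => intro _ l; rfl
  | cons kv P ih =>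
    intro hP l
    simp only [List.foldl_cons, foldRep]
    rw [replace_eq_myRep kv.2 l (mem_props (by simpa using hP kv (by simp))).1]
    exact ih (fun z hz => hP z (by simp [hz])) (myRep kv.1 kv.2 l)

-- ===== VERDICT (by name: the statement is the Claim_ definition above) =====
theorem translate_date_spec : Claim_equal_translate_date := by
  intro s _
  unfold Spec_translate_date translate_date translate_date_alt
  have h1 := toList_foldA translationsA s
  rw [tablesEq, foldChars_eq_foldRep translationsB (fun z hz => hz) s.toList,
      scan_eq_foldRep s.toList.length s.toList le_rfl] at h1
  rw [← h1]
  exact String.ofList_toList.symm
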